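-- pv_equiv track=rewrite | github.com/markkarimyan/battle_ships | src/utils.py | ships_touch_or_overlap
-- ===== SOURCE A (Python) =====
-- from typing import List, Tuple
--
-- BOARD_SIZE = 10
--
-- Coord = Tuple[int, int]
--
-- Ship = List[Coord]
--
-- def in_bounds(coord: Coord) -> bool:
--     return 0 <= coord[0] < BOARD_SIZE and 0 <= coord[1] < BOARD_SIZE
--
-- def get_adjacent_and_diagonal_cells(coord: Coord) -> List[Coord]:
--     row, col = coord
--     dirs = [
--         (-1, 0), (1, 0), (0, -1), (0, 1),
--         (-1, -1), (-1, 1), (1, -1), (1, 1),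
--     ]
--     out = []
--     for dr, dc in dirs:
--         p = (row + dr, col + dc)
--         if in_bounds(p):
--             out.append(p)
--     return out
--
-- def ships_touch_or_overlap(ships: List[Ship]) -> bool:
--     for ship in ships:
--         for coord in ship:
--             for other_ship in ships:
--                 if coord in other_ship:
--                     continue
--                 around = get_adjacent_and_diagonal_cells(coord)
--                 if any(cell in other_ship for cell in around):
--                     return True
--     return False
-- ===== SOURCE B (Python) =====
-- def ships_touch_or_overlap(ships):
--     occupied = set()
--     for ship in ships:
--         occupied.update(ship)
--     dirs = [
--         (-1, 0), (1, 0), (0, -1), (0, 1),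
--         (-1, -1), (-1, 1), (1, -1), (1, 1),
--     ]
--     for ship in ships:
--         shipset = set(ship)
--         for (r, c) in ship:
--             if 0 <= r < 10 and 0 <= c < 10:
--                 for dr, dc in dirs:
--                     p = (r + dr, c + dc)
--                     if p in occupied and p not in shipset:
--                         return True
--     return False
-- ===== Notes on version B (the rewrite author's own statement) =====
-- stated objective: faster
-- what changed: A scans, for every cell of every ship, every other ship's full coordinate list (all-pairs list membership); B builds one global occupancy set and one per-ship set once, then checks each in-bounds ship cell's 8 neighbours against those sets, using the symmetry of the neighbour relation.
import Mathlib
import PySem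

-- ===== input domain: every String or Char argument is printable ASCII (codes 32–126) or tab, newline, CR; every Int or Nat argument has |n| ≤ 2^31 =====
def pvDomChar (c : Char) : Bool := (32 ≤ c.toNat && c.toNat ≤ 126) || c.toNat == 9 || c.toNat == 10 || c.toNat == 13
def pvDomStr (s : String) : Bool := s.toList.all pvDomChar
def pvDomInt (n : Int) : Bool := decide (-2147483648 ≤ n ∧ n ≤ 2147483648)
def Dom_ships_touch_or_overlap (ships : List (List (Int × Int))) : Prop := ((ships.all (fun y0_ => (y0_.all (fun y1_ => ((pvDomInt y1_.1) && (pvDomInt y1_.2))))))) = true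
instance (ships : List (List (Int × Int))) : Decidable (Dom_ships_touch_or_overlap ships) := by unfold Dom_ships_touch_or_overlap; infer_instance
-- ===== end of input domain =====

-- B replaces A's all-pairs cells×cells scan by one global occupancy set and one
-- per-ship set, using the symmetry of the 8-neighbour relation (objective: faster).

-- ===== PORT A =====
def in_bounds (coord : Int × Int) : Bool :=
  decide (0 ≤ coord.1) && decide (coord.1 < 10) && decide (0 ≤ coord.2) && decide (coord.2 < 10)

def pvDirs : List (Int × Int) :=
  [(-1, 0), (1, 0), (0, -1), (0, 1), (-1, -1), (-1, 1), (1, -1), (1, 1)]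

def get_adjacent_and_diagonal_cells (coord : Int × Int) : List (Int × Int) :=
  pvDirs.foldl (fun out d =>
    let p := (coord.1 + d.1, coord.2 + d.2)
    if in_bounds p then out ++ [p] else out) []

def ships_touch_or_overlap (ships : List (List (Int × Int))) : Bool :=
  ships.any (fun ship =>
    ship.any (fun coord =>
      ships.any (fun other_ship =>
        if other_ship.contains coord then false
        else (get_adjacent_and_diagonal_cells coord).any (fun cell => other_ship.contains cell))))

-- ===== PORT B =====
def ships_touch_or_overlap_alt (ships : List (List (Int × Int))) : Bool :=
  let occupied := ships.foldl (fun s ship => PySem.Set.update s ship) PySem.Set.empty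
  ships.any (fun ship =>
    let shipset := PySem.Set.ofList ship
    ship.any (fun rc =>
      if decide (0 ≤ rc.1) && decide (rc.1 < 10) && decide (0 ≤ rc.2) && decide (rc.2 < 10) then
        ([(-1, 0), (1, 0), (0, -1), (0, 1), (-1, -1), (-1, 1), (1, -1), (1, 1)] :
            List (Int × Int)).any (fun d =>
          let p := (rc.1 + d.1, rc.2 + d.2)
          PySem.Set.contains occupied p && !(PySem.Set.contains shipset p))
      else false))

-- ===== PRECONDITION & SPEC =====
def Spec_ships_touch_or_overlap (ships : List (List (Int × Int))) (out : Bool) : Prop := out = ships_touch_or_overlap_alt ships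
instance (ships : List (List (Int × Int))) (out : Bool) : Decidable (Spec_ships_touch_or_overlap ships out) := by unfold Spec_ships_touch_or_overlap; infer_instance

-- ===== CLAIM (what is proved, stated in full; the proofs are below) =====
def Claim_equal_ships_touch_or_overlap : Prop := ∀ (ships : List (List (Int × Int))), Dom_ships_touch_or_overlap ships → Spec_ships_touch_or_overlap ships (ships_touch_or_overlap ships)

-- ===== LEMMAS AND PROOFS =====

lemma mem_adj (coord p : Int × Int) :
    p ∈ get_adjacent_and_diagonal_cells coord ↔
      in_bounds p = true ∧ ∃ d ∈ pvDirs, p = (coord.1 + d.1, coord.2 + d.2) := by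
  unfold get_adjacent_and_diagonal_cells
  show p ∈ pvDirs.foldl (fun out d =>
      if in_bounds (coord.1 + d.1, coord.2 + d.2) then out ++ [(coord.1 + d.1, coord.2 + d.2)]
      else out) [] ↔ _
  rw [show (pvDirs.foldl (fun out d =>
        if in_bounds (coord.1 + d.1, coord.2 + d.2) then out ++ [(coord.1 + d.1, coord.2 + d.2)]
        else out) [] : List (Int × Int)) =
      [] ++ (pvDirs.filter (fun d => in_bounds (coord.1 + d.1, coord.2 + d.2))).map
        (fun d => (coord.1 + d.1, coord.2 + d.2)) from
    PySem.List.foldl_append_if _ _ _ _]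
  simp only [List.nil_append, List.mem_map, List.mem_filter]
  constructor
  · rintro ⟨d, ⟨hd, hb⟩, rfl⟩; exact ⟨hb, d, hd, rfl⟩
  · rintro ⟨hb, d, hd, rfl⟩; exact ⟨d, ⟨hd, hb⟩, rfl⟩

lemma mem_occupied (ships : List (List (Int × Int))) (init : PySem.Set (Int × Int)) (x : Int × Int) :
    x ∈ ships.foldl (fun s ship => PySem.Set.update s ship) init ↔
      x ∈ init ∨ ∃ S ∈ ships, x ∈ S := by
  induction ships generalizing init with
  | nil => simp
  | cons S rest ih =>
    simp only [List.foldl_cons, ih, PySem.Set.mem_update, List.mem_cons]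
    constructor
    · rintro ((h | h) | ⟨T, hT, hx⟩)
      · exact Or.inl h
      · exact Or.inr ⟨S, Or.inl rfl, h⟩
      · exact Or.inr ⟨T, Or.inr hT, hx⟩
    · rintro (h | ⟨T, (rfl | hT), hx⟩)
      · exact Or.inl (Or.inl h)
      · exact Or.inl (Or.inr hx)
      · exact Or.inr ⟨T, hT, hx⟩

lemma dirs_neg (d : Int × Int) (hd : d ∈ pvDirs) : (-d.1, -d.2) ∈ pvDirs := by
  simp only [pvDirs, List.mem_cons, List.not_mem_nil, or_false] at hd ⊢
  rcases hd with rfl | rfl | rfl | rfl | rfl | rfl | rfl | rfl <;> simp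

lemma A_iff (ships : List (List (Int × Int))) :
    ships_touch_or_overlap ships = true ↔
      ∃ S ∈ ships, ∃ c ∈ S, ∃ T ∈ ships, c ∉ T ∧
        ∃ d ∈ pvDirs, in_bounds (c.1 + d.1, c.2 + d.2) = true ∧ (c.1 + d.1, c.2 + d.2) ∈ T := by
  unfold ships_touch_or_overlap
  simp only [List.any_eq_true, List.contains_eq_mem]
  constructor
  · rintro ⟨S, hS, c, hc, T, hT, h⟩
    refine ⟨S, hS, c, hc, T, hT, ?_⟩
    split at h
    · exact absurd h (by simp)
    · next hnot =>
      simp only [List.any_eq_true, decide_eq_true_eq] at h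
      obtain ⟨cell, hcell, hin⟩ := h
      rw [mem_adj] at hcell
      obtain ⟨hb, d, hd, rfl⟩ := hcell
      exact ⟨by simpa using hnot, d, hd, hb, hin⟩
  · rintro ⟨S, hS, c, hc, T, hT, hcT, d, hd, hb, hin⟩
    refine ⟨S, hS, c, hc, T, hT, ?_⟩
    rw [if_neg (by simpa using hcT)]
    simp only [List.any_eq_true, decide_eq_true_eq]
    exact ⟨(c.1 + d.1, c.2 + d.2), (mem_adj c _).mpr ⟨hb, d, hd, rfl⟩, hin⟩

lemma B_iff (ships : List (List (Int × Int))) :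
    ships_touch_or_overlap_alt ships = true ↔
      ∃ T ∈ ships, ∃ n ∈ T, in_bounds n = true ∧
        ∃ d ∈ pvDirs, (∃ S ∈ ships, (n.1 + d.1, n.2 + d.2) ∈ S) ∧ (n.1 + d.1, n.2 + d.2) ∉ T := by
  unfold ships_touch_or_overlap_alt
  simp only [List.any_eq_true, Bool.and_eq_true, PySem.Set.contains_eq_listContains, List.contains_eq_mem, decide_eq_true_eq]
  constructor
  · rintro ⟨T, hT, n, hn, h⟩
    split at h
    · next hb =>
      simp only [List.any_eq_true, Bool.and_eq_true, Bool.not_eq_true',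
        decide_eq_true_eq, decide_eq_false_iff_not] at h
      obtain ⟨d, hd, hocc, hns⟩ := h
      refine ⟨T, hT, n, hn, by simpa [in_bounds] using hb, d, ?_, ?_, ?_⟩
      · simpa [pvDirs] using hd
      · have := (mem_occupied ships PySem.Set.empty _).mp hocc
        simpa [PySem.Set.empty] using this
      · intro hmem
        exact hns (by simpa [PySem.Set.mem_ofList] using hmem)
    · exact absurd h (by simp)
  · rintro ⟨T, hT, n, hn, hb, d, hd, hocc, hnT⟩
    refine ⟨T, hT, n, hn, ?_⟩
    rw [if_pos (by simpa [in_bounds] using hb)]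
    simp only [List.any_eq_true, Bool.and_eq_true, Bool.not_eq_true',
      decide_eq_true_eq, decide_eq_false_iff_not]
    refine ⟨d, by simpa [pvDirs] using hd, ?_, ?_⟩
    · exact (mem_occupied ships PySem.Set.empty _).mpr (Or.inr hocc)
    · simpa [PySem.Set.mem_ofList] using hnT

-- ===== VERDICT (by name: the statement is the Claim_ definition above) =====
theorem ships_touch_or_overlap_spec : Claim_equal_ships_touch_or_overlap := by
  intro ships _
  unfold Spec_ships_touch_or_overlap
  have : ships_touch_or_overlap ships = true ↔ ships_touch_or_overlap_alt ships = true := by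
    rw [A_iff, B_iff]
    constructor
    · rintro ⟨S, hS, c, hc, T, hT, hcT, d, hd, hb, hnT⟩
      refine ⟨T, hT, (c.1 + d.1, c.2 + d.2), hnT, hb, (-d.1, -d.2), dirs_neg d hd, ?_, ?_⟩
      · refine ⟨S, hS, ?_⟩
        have : (c.1 + d.1 + -d.1, c.2 + d.2 + -d.2) = c := by
          obtain ⟨c1, c2⟩ := c; simp only [Prod.mk.injEq]; omega
        rw [this]; exact hc
      · have : (c.1 + d.1 + -d.1, c.2 + d.2 + -d.2) = c := by
          obtain ⟨c1, c2⟩ := c; simp only [Prod.mk.injEq]; omega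
        rw [this]; exact hcT
    · rintro ⟨T, hT, n, hn, hb, d, hd, ⟨S, hS, hc⟩, hnT⟩
      refine ⟨S, hS, (n.1 + d.1, n.2 + d.2), hc, T, hT, hnT, (-d.1, -d.2), dirs_neg d hd, ?_, ?_⟩
      · have : (n.1 + d.1 + -d.1, n.2 + d.2 + -d.2) = n := by
          obtain ⟨n1, n2⟩ := n; simp only [Prod.mk.injEq]; omega
        rw [this]; exact hb
      · have : (n.1 + d.1 + -d.1, n.2 + d.2 + -d.2) = n := by
          obtain ⟨n1, n2⟩ := n; simp only [Prod.mk.injEq]; omega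
        rw [this]; exact hn
  cases hA : ships_touch_or_overlap ships <;> cases hB : ships_touch_or_overlap_alt ships <;>
    simp_all
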